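-- pv_equiv track=rewrite | github.com/C4M-UofT/C4M-UofT.github.io | _old_resources/phaseIII/seminar5MikeBrudno/solution/ontology_explorer.py | get_all_paths_to_level
-- ===== SOURCE A (Python) =====
-- def get_all_paths_to_level(id_to_parents, start, level_ids, path=[]):
--     """ (dict of {str: list of str}, str, int) -> list of str
--
--     Return list of list of str representing paths from start to
--     the level containing level_ids ids in id_to_parents.
--
--     For example, id_num 0009122 and root_id 0000118, and
--     the level ids from level 2, return:
--     [['0009122', '0009115', '0011842'], ['0009122', '0009121', '0011842']]
--     """
--     path = path + [start]
--     if start in level_ids: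
--         return [path]
--     if not start in id_to_parents:
--         return []
--     paths = []
--     for node in id_to_parents[start]:
--         if node not in path:
--             newpaths = get_all_paths_to_level(id_to_parents, node, level_ids, path)
--             for newpath in newpaths:
--                 paths.append(newpath)
--     return paths
-- ===== SOURCE B (Python) =====
-- def get_all_paths_to_level(id_to_parents, start, level_ids, path=[]):
--     """Iterative work-list version: explicit stack of (node, path) states
--     replaces the recursive DFS; parents are pushed in reversed order so the
--     stack pops them left-to-right, giving the same pre-order path list."""
--     results = []
--     stack = [(start, path + [start])]
--     while stack:
--         node, p = stack.pop()
--         if node in level_ids: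
--             results.append(p)
--         elif node in id_to_parents:
--             stack.extend((q, p + [q]) for q in reversed(id_to_parents[node])
--                          if q not in p)
--     return results
-- ===== Notes on version B (the rewrite author's own statement) =====
-- stated objective: alternative
-- what changed: Replaces A's recursive DFS with an iterative work-list: an explicit stack of (node, path) states popped in LIFO order, parents pushed reversed so the enumeration order of paths is identical.
import Mathlib
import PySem

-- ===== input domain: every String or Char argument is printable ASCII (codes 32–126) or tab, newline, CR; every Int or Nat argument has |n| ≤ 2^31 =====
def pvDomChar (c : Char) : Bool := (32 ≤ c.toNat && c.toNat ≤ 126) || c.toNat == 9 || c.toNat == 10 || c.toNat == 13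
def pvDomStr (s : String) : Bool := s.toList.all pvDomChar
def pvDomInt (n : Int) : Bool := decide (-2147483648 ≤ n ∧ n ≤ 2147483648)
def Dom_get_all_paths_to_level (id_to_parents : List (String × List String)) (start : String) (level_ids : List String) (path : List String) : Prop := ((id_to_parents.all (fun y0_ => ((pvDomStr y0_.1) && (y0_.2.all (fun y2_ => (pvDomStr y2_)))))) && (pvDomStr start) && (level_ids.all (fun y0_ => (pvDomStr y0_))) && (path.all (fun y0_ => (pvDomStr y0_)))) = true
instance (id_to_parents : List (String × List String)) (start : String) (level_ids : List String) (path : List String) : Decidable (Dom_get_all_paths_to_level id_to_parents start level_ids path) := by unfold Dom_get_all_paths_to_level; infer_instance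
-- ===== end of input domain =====

-- B replaces A's recursive DFS by an iterative work-list (explicit stack of (node, path) states);
-- same return value, objective: alternative decomposition (no speed claim).

-- ===== termination measures (used by both ports' decreasing_by) =====

-- all node names reachable through parent lists
def pvU (d : List (String × List String)) : List String := d.flatMap (fun kv => kv.2)

-- total number of parent entries (bounds the number of children pushed in one step)
def pvK (d : List (String × List String)) : Nat := (d.map (fun kv => kv.2.length)).sum

-- measure for A's recursion: universe elements not yet on the path and ≠ the current node
def pvMu (d : List (String × List String)) (start : String) (path : List String) : Nat :=
  (pvU d).countP (fun x => !path.contains x && !(x == start))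

-- measure of one stack state: universe elements not yet on its path
def pvNu (d : List (String × List String)) (p : List String) : Nat :=
  (pvU d).countP (fun x => !p.contains x)

-- measure for B's loop: weighted stack size
def pvW (d : List (String × List String)) (stack : List (String × List String)) : Nat :=
  (stack.map (fun e => (pvK d + 1) ^ (pvNu d e.2))).sum

-- countP is strictly monotone when the weaker predicate has a witness the stronger misses
theorem pv_countP_lt {α : Type} (l : List α) (p q : α → Bool)
    (h : ∀ x ∈ l, p x = true → q x = true) (a : α) (ha : a ∈ l)
    (hqa : q a = true) (hpa : p a = false) :
    l.countP p < l.countP q := by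
  induction l with
  | nil => cases ha
  | cons b t ih =>
    rcases List.mem_cons.mp ha with rfl | hat
    · have hmono : t.countP p ≤ t.countP q :=
        List.countP_mono_left (fun x hx hpx => h x (List.mem_cons_of_mem _ hx) hpx)
      simp [hpa, hqa]; omega
    · have hlt := ih (fun x hx hpx => h x (List.mem_cons_of_mem _ hx) hpx) hat
      have hb : p b = true → q b = true := h b (List.mem_cons_self ..)
      simp only [List.countP_cons]
      cases hpb : p b with
      | false => cases hqb : q b <;> simp <;> omega
      | true => simp [hb hpb]; omega

-- members of a value produced by a dict lookup lie in pvU, and its length is at most pvK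
theorem pv_get_sub (d : List (String × List String)) (n : String) (ps : List String)
    (h : PySem.Dict.get? (PySem.Dict.mk d) n = some ps) :
    (∀ q ∈ ps, q ∈ pvU d) ∧ ps.length ≤ pvK d := by
  induction d with
  | nil => simp [PySem.Dict.get?] at h
  | cons kv t ih =>
    rw [show PySem.Dict.mk (kv :: t) = PySem.Dict.mk ((kv.1, kv.2) :: t) by rfl,
      PySem.Dict.get?_mk_cons] at h
    by_cases hk : (kv.1 == n) = true
    · simp [hk] at h
      subst h
      constructor
      · intro q hq; simp only [pvU, List.flatMap_cons, List.mem_append]; exact Or.inl hq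
      · simp only [pvK, List.map_cons, List.sum_cons]; omega
    · simp [hk] at h
      obtain ⟨h1, h2⟩ := ih h
      constructor
      · intro q hq; simp [pvU] at *
        rcases h1 q hq with ⟨a, b, hab, hqb⟩; exact Or.inr ⟨a, b, hab, hqb⟩
      · simp only [pvK, List.map_cons, List.sum_cons] at *; omega

theorem pvMu_dec (d : List (String × List String)) (start node : String) (path : List String)
    (hU : node ∈ pvU d) (hn : (path ++ [start]).contains node = false) :
    pvMu d node (path ++ [start]) < pvMu d start path := by
  simp only [List.contains_append, Bool.or_eq_false_iff] at hn
  obtain ⟨hn1, hn2⟩ := hn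
  simp only [List.contains_cons, List.contains_nil, Bool.or_false] at hn2
  apply pv_countP_lt _ _ _ _ node hU
  · simp only [Bool.and_eq_true, Bool.not_eq_true']
    exact ⟨hn1, hn2⟩
  · simp
  · intro x _ hx
    simp only [List.contains_append, List.contains_cons, List.contains_nil] at hx ⊢
    simp at hx ⊢
    exact ⟨hx.1.1, fun he => hx.1.2 (by simp [he])⟩

theorem pvNu_dec (d : List (String × List String)) (q : String) (p : List String)
    (hU : q ∈ pvU d) (hq : p.contains q = false) :
    pvNu d (p ++ [q]) < pvNu d p := by
  apply pv_countP_lt _ _ _ _ q hU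
  · simp only [Bool.not_eq_true']
    exact hq
  · simp
  · intro x _ hx
    simp only [List.contains_append] at hx
    simp at hx ⊢
    exact hx.1

theorem pv_pow_pos (d : List (String × List String)) (m : Nat) : 0 < (pvK d + 1) ^ m :=
  Nat.pow_pos (by omega)

-- total weight of the children pushed for one expanded state is below that state's weight
theorem pv_children_lt (d : List (String × List String)) (node : String) (p : List String)
    (ps : List String) (h : PySem.Dict.get? (PySem.Dict.mk d) node = some ps) :
    pvW d ((ps.filter (fun q => !p.contains q)).map (fun q => (q, p ++ [q])))
      < (pvK d + 1) ^ (pvNu d p) := by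
  obtain ⟨hsub, hlen⟩ := pv_get_sub d node ps h
  by_cases hc : ps.filter (fun q => !p.contains q) = []
  · rw [hc]; simp only [List.map_nil, pvW, List.sum_nil]; exact pv_pow_pos d (pvNu d p)
  · obtain ⟨q0, hq0⟩ := List.exists_mem_of_ne_nil _ hc
    have hq0' := List.mem_filter.mp hq0
    have hm1 : 1 ≤ pvNu d p := by
      have := pvNu_dec d q0 p (hsub _ hq0'.1) (by simpa using hq0'.2)
      omega
    have hbound : ∀ w ∈ ((ps.filter (fun q => !p.contains q)).map
        (fun q => (q, p ++ [q]))).map (fun e => (pvK d + 1) ^ (pvNu d e.2)),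
        w ≤ (pvK d + 1) ^ (pvNu d p - 1) := by
      intro w hw
      simp only [List.mem_map] at hw
      obtain ⟨e, ⟨q, hq, rfl⟩, rfl⟩ := hw
      have hq' := List.mem_filter.mp hq
      have := pvNu_dec d q p (hsub _ hq'.1) (by simpa using hq'.2)
      show (pvK d + 1) ^ pvNu d (p ++ [q]) ≤ (pvK d + 1) ^ (pvNu d p - 1)
      exact Nat.pow_le_pow_right (by omega) (by omega)
    have hsum := List.sum_le_card_nsmul _ _ hbound
    have hlen2 : (((ps.filter (fun q => !p.contains q)).map
        (fun q => (q, p ++ [q]))).map (fun e => (pvK d + 1) ^ (pvNu d e.2))).length ≤ pvK d := by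
      simp only [List.length_map]
      calc (ps.filter (fun q => !p.contains q)).length ≤ ps.length := List.length_filter_le _ _
        _ ≤ pvK d := hlen
    have hpow : (pvK d + 1) ^ (pvNu d p) = (pvK d + 1) ^ (pvNu d p - 1) * (pvK d + 1) := by
      rw [← Nat.pow_succ]; congr 1; omega
    have hpos := pv_pow_pos d (pvNu d p - 1)
    simp only [smul_eq_mul] at hsum
    calc pvW d ((ps.filter (fun q => !p.contains q)).map (fun q => (q, p ++ [q])))
        ≤ _ * (pvK d + 1) ^ (pvNu d p - 1) := hsum
      _ ≤ pvK d * (pvK d + 1) ^ (pvNu d p - 1) := Nat.mul_le_mul_right _ hlen2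
      _ < (pvK d + 1) ^ (pvNu d p - 1) * (pvK d + 1) := by nlinarith
      _ = (pvK d + 1) ^ (pvNu d p) := hpow.symm

-- ===== PORT A =====
-- transliteration of A's recursive DFS; `ps.attach` only carries the membership proof
-- needed for termination, the fold is A's accumulator loop
def get_all_paths_to_level (id_to_parents : List (String × List String)) (start : String)
    (level_ids : List String) (path : List String) : List (List String) :=
  let path' := path ++ [start]                     -- path = path + [start]
  if level_ids.contains start then [path']          -- if start in level_ids: return [path]
  else
    match h : PySem.Dict.get? (PySem.Dict.mk id_to_parents) start with
    | none => []                                    -- if not start in id_to_parents: return []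
    | some ps =>                                    -- for node in id_to_parents[start]: …
        ps.attach.foldl
          (fun paths node =>
            if (path ++ [start]).contains node.1 then paths
            else paths ++ get_all_paths_to_level id_to_parents node.1 level_ids (path ++ [start]))
          []
termination_by pvMu id_to_parents start path
decreasing_by
  exact pvMu_dec id_to_parents start node.1 path
    ((pv_get_sub id_to_parents start ps h).1 node.1 node.2) (Bool.eq_false_iff.mpr ‹_›)

-- ===== PORT B =====
-- B's while-loop over the explicit stack; the Lean list's HEAD models the Python list's END
-- (the stack top), so Python's `extend` of the REVERSED, filtered parents is prepending the
-- filtered parents in their original order.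
def pvBLoop (id_to_parents : List (String × List String)) (level_ids : List String)
    (stack : List (String × List String)) (results : List (List String)) : List (List String) :=
  match stack with
  | [] => results                                   -- while stack: … (loop ends)
  | (node, p) :: rest =>                            -- node, p = stack.pop()
    if level_ids.contains node then
      pvBLoop id_to_parents level_ids rest (results ++ [p])   -- results.append(p)
    else
      match h : PySem.Dict.get? (PySem.Dict.mk id_to_parents) node with
      | none => pvBLoop id_to_parents level_ids rest results
      | some ps =>                                  -- stack.extend((q, p+[q]) for q in reversed(…) if q not in p)
          pvBLoop id_to_parents level_ids
            (((ps.filter (fun q => !p.contains q)).map (fun q => (q, p ++ [q]))) ++ rest) results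
termination_by pvW id_to_parents stack
decreasing_by
  · have := pv_pow_pos id_to_parents (pvNu id_to_parents p)
    simp only [pvW, List.map_cons, List.sum_cons]; omega
  · have := pv_pow_pos id_to_parents (pvNu id_to_parents p)
    simp only [pvW, List.map_cons, List.sum_cons]; omega
  · have := pv_children_lt id_to_parents node p ps h
    simp only [pvW, List.map_append, List.sum_append, List.map_cons, List.sum_cons] at *
    omega

def get_all_paths_to_level_alt (id_to_parents : List (String × List String)) (start : String)
    (level_ids : List String) (path : List String) : List (List String) :=
  pvBLoop id_to_parents level_ids [(start, path ++ [start])] []   -- stack = [(start, path + [start])]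

-- ===== PRECONDITION & SPEC =====
def Spec_get_all_paths_to_level (id_to_parents : List (String × List String)) (start : String) (level_ids : List String) (path : List String) (out : List (List String)) : Prop := out = get_all_paths_to_level_alt id_to_parents start level_ids path
instance (id_to_parents : List (String × List String)) (start : String) (level_ids : List String) (path : List String) (out : List (List String)) : Decidable (Spec_get_all_paths_to_level id_to_parents start level_ids path out) := by unfold Spec_get_all_paths_to_level; infer_instance

-- ===== CLAIM (what is proved, stated in full; the proofs are below) =====
def Claim_equal_get_all_paths_to_level : Prop := ∀ (id_to_parents : List (String × List String)) (start : String) (level_ids : List String) (path : List String), Dom_get_all_paths_to_level id_to_parents start level_ids path → Spec_get_all_paths_to_level id_to_parents start level_ids path (get_all_paths_to_level id_to_parents start level_ids path)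

-- ===== LEMMAS AND PROOFS =====

-- A's accumulator loop (skip nodes already on the path, extend with the recursive results)
-- is a flatMap over the filtered parent list
theorem pv_fold_flat {α β : Type} (l : List α) (c : α → Bool) (g : α → List β) (acc : List β) :
    l.foldl (fun a x => if c x then a else a ++ g x) acc
      = acc ++ (l.filter (fun x => !c x)).flatMap g := by
  induction l generalizing acc with
  | nil => simp
  | cons x t ih =>
    cases hx : c x <;> simp [List.foldl_cons, hx, ih, List.append_assoc]

-- branch-wise unfolding of A's port (the `attach` scaffolding removed)
theorem ga_lvl (d : List (String × List String)) (start : String) (lvl : List String)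
    (path : List String) (h1 : lvl.contains start = true) :
    get_all_paths_to_level d start lvl path = [path ++ [start]] := by
  rw [get_all_paths_to_level.eq_def, if_pos h1]

theorem ga_none (d : List (String × List String)) (start : String) (lvl : List String)
    (path : List String) (h1 : lvl.contains start = false)
    (h2 : PySem.Dict.get? (PySem.Dict.mk d) start = none) :
    get_all_paths_to_level d start lvl path = [] := by
  rw [get_all_paths_to_level.eq_def, if_neg (Bool.eq_false_iff.mp h1)]
  split
  · rfl
  · next ps heq => rw [h2] at heq; cases heq

theorem ga_some (d : List (String × List String)) (start : String) (lvl : List String)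
    (path : List String) (ps : List String) (h1 : lvl.contains start = false)
    (h2 : PySem.Dict.get? (PySem.Dict.mk d) start = some ps) :
    get_all_paths_to_level d start lvl path
      = ps.foldl (fun paths q => if (path ++ [start]).contains q then paths
          else paths ++ get_all_paths_to_level d q lvl (path ++ [start])) [] := by
  rw [get_all_paths_to_level.eq_def, if_neg (Bool.eq_false_iff.mp h1)]
  split
  · next heq => rw [h2] at heq; cases heq
  · next ps' heq =>
    rw [h2] at heq
    cases heq
    exact List.foldl_attach (f := fun paths q => if (path ++ [start]).contains q = true then paths
      else paths ++ get_all_paths_to_level d q lvl (path ++ [start])) (b := [])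

-- branch-wise stepping of B's loop
theorem bl_none (d : List (String × List String)) (lvl : List String) (node : String)
    (p : List String) (rest : List (String × List String)) (res : List (List String))
    (h1 : lvl.contains node = false)
    (h2 : PySem.Dict.get? (PySem.Dict.mk d) node = none) :
    pvBLoop d lvl ((node, p) :: rest) res = pvBLoop d lvl rest res := by
  rw [pvBLoop, if_neg (Bool.eq_false_iff.mp h1)]
  split
  · rfl
  · next ps heq => rw [h2] at heq; cases heq

theorem bl_some (d : List (String × List String)) (lvl : List String) (node : String)
    (p : List String) (rest : List (String × List String)) (res : List (List String))
    (ps : List String) (h1 : lvl.contains node = false)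
    (h2 : PySem.Dict.get? (PySem.Dict.mk d) node = some ps) :
    pvBLoop d lvl ((node, p) :: rest) res
      = pvBLoop d lvl (((ps.filter (fun q => !p.contains q)).map (fun q => (q, p ++ [q]))) ++ rest) res := by
  rw [pvBLoop, if_neg (Bool.eq_false_iff.mp h1)]
  split
  · next heq => rw [h2] at heq; cases heq
  · next ps' heq => rw [h2] at heq; cases heq; rfl

-- the loop invariant: pvBLoop returns the accumulated results followed by the recursive
-- DFS results of each stack state, in stack order
theorem pvBLoop_eq (d : List (String × List String)) (lvl : List String)
    (stack : List (String × List String)) (res : List (List String))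
    (hinv : ∀ e ∈ stack, e.2 = e.2.dropLast ++ [e.1]) :
    pvBLoop d lvl stack res
      = res ++ stack.flatMap (fun e => get_all_paths_to_level d e.1 lvl e.2.dropLast) := by
  induction stack, res using pvBLoop.induct d lvl with
  | case1 res => simp [pvBLoop]
  | case2 res node p rest h1 ih =>
    have hp : p = p.dropLast ++ [node] := hinv (node, p) (List.mem_cons_self ..)
    rw [pvBLoop, if_pos h1, ih (fun e he => hinv e (List.mem_cons_of_mem _ he))]
    have : get_all_paths_to_level d node lvl p.dropLast = [p] := by
      rw [ga_lvl d node lvl p.dropLast h1, ← hp]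
    simp [this]
  | case3 res node p rest h1 h2 ih =>
    have hp : p = p.dropLast ++ [node] := hinv (node, p) (List.mem_cons_self ..)
    rw [bl_none d lvl node p rest res (Bool.eq_false_iff.mpr h1) h2,
      ih (fun e he => hinv e (List.mem_cons_of_mem _ he))]
    have hga : get_all_paths_to_level d node lvl p.dropLast = [] :=
      ga_none d node lvl p.dropLast (Bool.eq_false_iff.mpr h1) h2
    simp [hga]
  | case4 res node p rest h1 ps h2 ih =>
    have hp : p = p.dropLast ++ [node] := hinv (node, p) (List.mem_cons_self ..)
    have hinv' : ∀ e ∈ ((ps.filter (fun q => !p.contains q)).map (fun q => (q, p ++ [q]))) ++ rest,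
        e.2 = e.2.dropLast ++ [e.1] := by
      intro e he
      rcases List.mem_append.mp he with he | he
      · obtain ⟨q, _, rfl⟩ := List.mem_map.mp he
        simp
      · exact hinv e (List.mem_cons_of_mem _ he)
    rw [bl_some d lvl node p rest res ps (Bool.eq_false_iff.mpr h1) h2, ih hinv']
    have hga : get_all_paths_to_level d node lvl p.dropLast
        = (ps.filter (fun q => !p.contains q)).flatMap
            (fun q => get_all_paths_to_level d q lvl p) := by
      rw [ga_some d node lvl p.dropLast ps (Bool.eq_false_iff.mpr h1) h2]
      rw [show p.dropLast ++ [node] = p from hp.symm]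
      exact pv_fold_flat ps (fun q => p.contains q) (fun q => get_all_paths_to_level d q lvl p) []
    simp only [List.flatMap_append, List.flatMap_cons, List.flatMap_map, hga]
    simp only [List.dropLast_concat]

-- ===== VERDICT (by name: the statement is the Claim_ definition above) =====
theorem get_all_paths_to_level_spec : Claim_equal_get_all_paths_to_level := by
  intro d start lvl path _
  unfold Spec_get_all_paths_to_level get_all_paths_to_level_alt
  rw [pvBLoop_eq d lvl [(start, path ++ [start])] []
    (by intro e he; simp only [List.mem_singleton] at he; subst he; rw [List.dropLast_concat])]
  simp
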